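-- pv_equiv track=rewrite | github.com/iclcv/icl | scripts/fix-matrix-indexing2.py | split_two_args
-- ===== SOURCE A (Python) =====
-- def split_two_args(content):
--     """Split 'arg1, arg2' respecting nested parens. Returns (a1, a2) or None if not exactly 2 args."""
--     depth = 0
--     for i, c in enumerate(content):
--         if c in '([<':
--             depth += 1
--         elif c in ')]>':
--             depth -= 1
--         elif c == ',' and depth == 0:
--             # Check no more commas at depth 0
--             rest = content[i+1:]
--             d2 = 0
--             for c2 in rest:
--                 if c2 in '([<':
--                     d2 += 1
--                 elif c2 in ')]>':
--                     d2 -= 1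
--                 elif c2 == ',' and d2 == 0:
--                     return None  # 3+ args
--             return (content[:i].strip(), content[i+1:].strip())
--     return None  # 0 or 1 arg
-- ===== SOURCE B (Python) =====
-- def split_two_args(content):
--     """Split 'arg1, arg2' respecting nested parens. Returns (a1, a2) or None if not exactly 2 args."""
--     depth = 0
--     commas = []
--     for i, c in enumerate(content):
--         if c in '([<':
--             depth += 1
--         elif c in ')]>':
--             depth -= 1
--         elif c == ',' and depth == 0:
--             commas.append(i)
--     if len(commas) != 1:
--         return None
--     p = commas[0]
--     return (content[:p].strip(), content[p+1:].strip())
-- ===== Notes on version B (the rewrite author's own statement) =====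
-- stated objective: simpler
-- what changed: Replaces the nested find-first-comma-then-rescan-the-rest loops with one flat pass that collects all depth-0 comma indices and then checks the list has exactly one element.
import Mathlib
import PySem

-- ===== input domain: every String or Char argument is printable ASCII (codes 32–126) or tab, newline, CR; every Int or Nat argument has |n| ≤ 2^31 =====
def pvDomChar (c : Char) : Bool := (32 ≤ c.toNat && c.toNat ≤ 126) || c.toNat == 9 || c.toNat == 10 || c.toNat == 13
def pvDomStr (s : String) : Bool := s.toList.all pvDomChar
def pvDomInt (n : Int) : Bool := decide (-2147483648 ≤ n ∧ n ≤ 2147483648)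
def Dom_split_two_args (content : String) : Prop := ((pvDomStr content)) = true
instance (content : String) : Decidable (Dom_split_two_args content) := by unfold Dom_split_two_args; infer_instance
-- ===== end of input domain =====

-- B replaces A's nested first-comma-then-rescan loops with one flat pass collecting all
-- depth-0 comma indices and a final count check (objective: simpler).

-- ===== PORT A =====
-- c in '([<'  /  c in ')]>'  (single-char membership in a literal string)
def pvOpenChar (c : Char) : Bool := c = '(' || c = '[' || c = '<'
def pvCloseChar (c : Char) : Bool := c = ')' || c = ']' || c = '>'

-- inner loop of A: scan `rest` for a comma at depth 0 (returns true ↔ A returns None there)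
def pvARest (d2 : Int) : List Char → Bool
  | [] => false
  | c :: cs =>
    if pvOpenChar c then pvARest (d2 + 1) cs
    else if pvCloseChar c then pvARest (d2 - 1) cs
    else if c = ',' ∧ d2 = 0 then true
    else pvARest d2 cs

-- outer loop of A over (i, c) = enumerate(content); content[:i] / content[i+1:] are
-- full.take i / full.drop (i+1) (PySem.List.slice_to_natCast / slice_from_natCast, i in range)
def pvALoop (full : List Char) (depth : Int) (i : Nat) : List Char → Option (String × String)
  | [] => none
  | c :: cs =>
    if pvOpenChar c then pvALoop full (depth + 1) (i + 1) cs
    else if pvCloseChar c then pvALoop full (depth - 1) (i + 1) cs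
    else if c = ',' ∧ depth = 0 then
      if pvARest 0 (full.drop (i + 1)) then none
      else some (String.ofList (PySem.Chars.strip (full.take i)),
                 String.ofList (PySem.Chars.strip (full.drop (i + 1))))
    else pvALoop full depth (i + 1) cs

def split_two_args (content : String) : Option (String × String) :=
  pvALoop content.toList 0 0 content.toList

-- ===== PORT B =====
-- B's single pass: the indices of all commas at paren depth 0
def pvBCommas (depth : Int) (i : Nat) : List Char → List Nat
  | [] => []
  | c :: cs =>
    if pvOpenChar c then pvBCommas (depth + 1) (i + 1) cs
    else if pvCloseChar c then pvBCommas (depth - 1) (i + 1) cs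
    else if c = ',' ∧ depth = 0 then i :: pvBCommas depth (i + 1) cs
    else pvBCommas depth (i + 1) cs

def split_two_args_alt (content : String) : Option (String × String) :=
  let s := content.toList
  match pvBCommas 0 0 s with
  | [p] => some (String.ofList (PySem.Chars.strip (s.take p)),
                 String.ofList (PySem.Chars.strip (s.drop (p + 1))))
  | _ => none

-- ===== PRECONDITION & SPEC =====
def Spec_split_two_args (content : String) (out : Option (String × String)) : Prop := out = split_two_args_alt content
instance (content : String) (out : Option (String × String)) : Decidable (Spec_split_two_args content out) := by unfold Spec_split_two_args; infer_instance

-- ===== CLAIM (what is proved, stated in full; the proofs are below) =====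
def Claim_equal_split_two_args : Prop := ∀ (content : String), Dom_split_two_args content → Spec_split_two_args content (split_two_args content)

-- ===== LEMMAS AND PROOFS =====

-- A's rescan reports a comma iff B's collector finds one in the same suffix
theorem pvARest_iff_commas (cs : List Char) : ∀ (d : Int) (i : Nat),
    pvARest d cs = true ↔ pvBCommas d i cs ≠ [] := by
  induction cs with
  | nil => simp [pvARest, pvBCommas]
  | cons c cs ih =>
    intro d i
    simp only [pvARest, pvBCommas]
    split_ifs with h1 h2 h3
    · exact ih _ (i + 1)
    · exact ih _ (i + 1)
    · simp
    · exact ih _ (i + 1)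

-- loop correspondence: A's outer loop at state (depth, i, cs) with cs = full.drop i
-- computes B's match over the commas collected from the same state
theorem pvALoop_eq (cs : List Char) : ∀ (full : List Char) (depth : Int) (i : Nat),
    full.drop i = cs →
    pvALoop full depth i cs =
      (match pvBCommas depth i cs with
       | [p] => some (String.ofList (PySem.Chars.strip (full.take p)),
                      String.ofList (PySem.Chars.strip (full.drop (p + 1))))
       | _ => none) := by
  induction cs with
  | nil => intro full depth i h; simp [pvALoop, pvBCommas]
  | cons c cs ih =>
    intro full depth i h
    have hdrop : full.drop (i + 1) = cs := by
      rw [← List.tail_drop, h]; rfl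
    simp only [pvALoop, pvBCommas]
    split_ifs with h1 h2 h3 h4
    · exact ih full (depth + 1) (i + 1) hdrop
    · exact ih full (depth - 1) (i + 1) hdrop
    · rw [hdrop] at h4
      obtain ⟨q, rest, hb⟩ :=
        List.exists_cons_of_ne_nil ((pvARest_iff_commas cs 0 (i + 1)).mp h4)
      rw [h3.2, hb]
    · rw [hdrop] at h4
      have hb : pvBCommas 0 (i + 1) cs = [] := by
        by_contra hne
        exact absurd ((pvARest_iff_commas cs 0 (i + 1)).mpr hne) h4
      rw [h3.2, hb]
    · exact ih full depth (i + 1) hdrop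

-- ===== VERDICT (by name: the statement is the Claim_ definition above) =====
theorem split_two_args_spec : Claim_equal_split_two_args := by
  intro content _
  unfold Spec_split_two_args split_two_args split_two_args_alt
  exact pvALoop_eq content.toList content.toList 0 0 (by simp)
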